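-- pv_equiv track=rewrite | github.com/vZyx/Python-notes | 14_strings/homework/02_medium/04.py | our_replace
-- ===== SOURCE A (Python) =====
-- def our_replace(main_str, pattern, repalce_with):
--     idx = 0
--     res = ''
--     n = len(pattern)
--
--     if n == 0:
--         return main_str
--
--
--     while idx < len(main_str):
--         # If matched: add and jump. Otherwise move to the next step
--         substr = main_str[idx:idx + n]
--         if substr == pattern:
--             res += repalce_with
--             idx += n
--         else:
--             res += main_str[idx]
--             idx += 1
--     return res
-- ===== SOURCE B (Python) =====
-- def our_replace(main_str, pattern, repalce_with):
--     # Idiomatic: Python's str.replace performs exactly this left-to-right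
--     # non-overlapping replacement; the empty pattern is a no-op as in A.
--     if not pattern:
--         return main_str
--     return main_str.replace(pattern, repalce_with)
-- ===== Notes on version B (the rewrite author's own statement) =====
-- stated objective: idiomatic
-- what changed: Replaced the hand-written character-by-character scan-and-concatenate loop with a single call to Python's built-in str.replace (guarding the empty pattern, which A leaves unchanged).
import Mathlib
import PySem

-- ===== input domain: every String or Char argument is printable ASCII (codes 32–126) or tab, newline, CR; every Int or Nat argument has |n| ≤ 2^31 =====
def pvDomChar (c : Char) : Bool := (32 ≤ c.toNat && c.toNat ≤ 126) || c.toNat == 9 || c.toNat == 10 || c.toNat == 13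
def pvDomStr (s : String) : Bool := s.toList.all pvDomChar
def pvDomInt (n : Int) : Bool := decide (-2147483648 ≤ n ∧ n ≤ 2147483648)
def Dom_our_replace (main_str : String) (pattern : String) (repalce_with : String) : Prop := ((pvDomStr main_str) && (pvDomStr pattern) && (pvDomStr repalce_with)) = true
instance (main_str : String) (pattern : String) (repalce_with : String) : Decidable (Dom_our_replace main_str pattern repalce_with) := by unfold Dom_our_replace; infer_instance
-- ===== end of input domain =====

-- B replaces A's hand-written scan-and-concatenate loop with the library replace
-- (Python's str.replace / PySem.Str.replace): same value, idiomatic one-liner.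

-- ===== PORT A =====
-- the while loop of A: idx scans main_str, res accumulates; hn keeps the jump idx+n decreasing
def our_replace_go (s pat rep : List Char) (hn : 0 < pat.length) (idx : Nat) (res : List Char) : List Char :=
  if h : idx < s.length then
    if PySem.List.slice s (some (idx : Int)) (some ((idx : Int) + (pat.length : Int))) = pat then
      our_replace_go s pat rep hn (idx + pat.length) (res ++ rep)
    else
      our_replace_go s pat rep hn (idx + 1) (res ++ [s.get ⟨idx, h⟩])
  else res
termination_by s.length - idx
decreasing_by all_goals omega

def our_replace (main_str : String) (pattern : String) (repalce_with : String) : String :=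
  if h : pattern.toList.length = 0 then main_str
  else String.ofList (our_replace_go main_str.toList pattern.toList repalce_with.toList (by omega) 0 [])

-- ===== PORT B =====
def our_replace_alt (main_str : String) (pattern : String) (repalce_with : String) : String :=
  if pattern.toList = [] then main_str
  else PySem.Str.replace main_str pattern repalce_with

-- ===== PRECONDITION & SPEC =====
def Spec_our_replace (main_str : String) (pattern : String) (repalce_with : String) (out : String) : Prop := out = our_replace_alt main_str pattern repalce_with
instance (main_str : String) (pattern : String) (repalce_with : String) (out : String) : Decidable (Spec_our_replace main_str pattern repalce_with out) := by unfold Spec_our_replace; infer_instance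

-- ===== CLAIM (what is proved, stated in full; the proofs are below) =====
def Claim_equal_our_replace : Prop := ∀ (main_str : String) (pattern : String) (repalce_with : String), Dom_our_replace main_str pattern repalce_with → Spec_our_replace main_str pattern repalce_with (our_replace main_str pattern repalce_with)

-- ===== LEMMAS AND PROOFS =====

-- common normal form: the pure recursion both loops compute
def repRec (pat rep : List Char) (hn : 0 < pat.length) : List Char → List Char
  | [] => []
  | c :: t =>
    if pat.isPrefixOf (c :: t) then rep ++ repRec pat rep hn ((c :: t).drop pat.length)
    else c :: repRec pat rep hn t
termination_by l => l.length
decreasing_by all_goals simp [List.length_drop] <;> omega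

theorem our_replace_go_eq (s pat rep : List Char) (hn : 0 < pat.length) (idx : Nat) (res : List Char) :
    our_replace_go s pat rep hn idx res = res ++ repRec pat rep hn (s.drop idx) := by
  fun_induction our_replace_go s pat rep hn idx res with
  | case1 idx res h hm ih =>
    have hdrop : s.drop idx = s.get ⟨idx, h⟩ :: s.drop (idx + 1) := List.drop_eq_getElem_cons h
    have hslice : PySem.List.slice s (some (idx : Int)) (some ((idx : Int) + (pat.length : Int))) = (s.drop idx).take pat.length :=
      PySem.List.slice_natCast_add s idx pat.length
    have hpre : pat <+: s.drop idx := by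
      rw [hslice] at hm
      exact List.prefix_iff_eq_take.mpr hm.symm
    have hp : pat.isPrefixOf (s.drop idx) = true := List.isPrefixOf_iff_prefix.mpr hpre
    rw [ih]
    rw [hdrop] at hp ⊢
    rw [repRec, if_pos hp]
    have : (s.get ⟨idx, h⟩ :: s.drop (idx + 1)).drop pat.length = s.drop (idx + pat.length) := by
      rw [← hdrop, List.drop_drop]
    rw [this, List.append_assoc]
  | case2 idx res h hm ih =>
    have hdrop : s.drop idx = s.get ⟨idx, h⟩ :: s.drop (idx + 1) := List.drop_eq_getElem_cons h
    have hslice : PySem.List.slice s (some (idx : Int)) (some ((idx : Int) + (pat.length : Int))) = (s.drop idx).take pat.length :=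
      PySem.List.slice_natCast_add s idx pat.length
    have hp : ¬ pat <+: s.drop idx := by
      intro hc
      exact hm (by rw [hslice]; exact (List.prefix_iff_eq_take.mp hc).symm)
    rw [ih, hdrop]
    rw [repRec, if_neg (by rw [List.isPrefixOf_iff_prefix, ← hdrop]; exact hp)]
    simp
  | case3 idx res h =>
    rw [List.drop_of_length_le (by omega)]
    simp [repRec]

theorem replace_go_eq (pat rep : List Char) (hn : 0 < pat.length) :
    ∀ fuel l acc, l.length ≤ fuel →
      PySem.Chars.replace.go pat rep fuel l acc = acc.reverse ++ repRec pat rep hn l := by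
  intro fuel
  induction fuel with
  | zero =>
    intro l acc hl
    have : l = [] := List.eq_nil_of_length_eq_zero (by omega)
    subst this
    simp [PySem.Chars.replace.go, repRec]
  | succ fuel ih =>
    intro l acc hl
    match l with
    | [] => simp [PySem.Chars.replace.go, repRec]
    | c :: t =>
      rw [PySem.Chars.replace.go]
      by_cases hp : pat.isPrefixOf (c :: t)
      · rw [if_pos hp]
        have hlen : ((c :: t).drop pat.length).length ≤ fuel := by
          simp only [List.length_drop, List.length_cons] at *
          omega
        rw [ih _ _ hlen]
        simp [repRec, hp]
      · rw [if_neg hp]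
        have hlen : t.length ≤ fuel := by simp at hl; omega
        rw [ih _ _ hlen]
        simp [repRec, hp]

-- ===== VERDICT (by name: the statement is the Claim_ definition above) =====
theorem our_replace_spec : Claim_equal_our_replace := by
  intro main_str pattern repalce_with _
  unfold Spec_our_replace our_replace our_replace_alt
  by_cases h : pattern.toList = []
  · simp [h]
  · have hn : 0 < pattern.toList.length := List.length_pos_iff.mpr h
    rw [dif_neg (by omega), if_neg h]
    rw [our_replace_go_eq]
    unfold PySem.Str.replace PySem.Chars.replace
    rw [if_neg (by simp [List.isEmpty_iff, h])]
    rw [replace_go_eq pattern.toList repalce_with.toList hn _ _ _ (le_refl _)]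
    simp
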